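-- pv_equiv track=rewrite | github.com/pypi-data/pypi-mirror-360 | packages/PITLAKQ/pitlakq-1.7.7-py3-none-any.whl/pitlakq/preprocessing/input_converter.py | get_mixed_case
-- ===== SOURCE A (Python) =====
-- def get_mixed_case(line):
--     """Find the mixedCase word.
--     """
--     # strip off comments
--     line = line.split('#')[0]
--     words = line.split()
--     for word in words:
--         if len(word) > 1 and word[0].islower():
--             for character in word[1:]:
--                 if character == '_':
--                     break
--                 if character.isupper():
--                     return word
--     return False
-- ===== SOURCE B (Python) =====
-- def get_mixed_case(line):
--     """Find the mixedCase word by one character-level scan (a small state machine),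
--     instead of splitting into words and re-scanning each word."""
--     buf = []          # characters of the current word
--     active = False    # word started lowercase and no '_' seen yet
--     matched = False   # current word already qualified
--     for ch in line:
--         if ch == '#':
--             break
--         if ch.isspace():
--             if matched:
--                 return ''.join(buf)
--             buf = []
--             active = False
--             matched = False
--         elif not buf:
--             buf = [ch]
--             active = ch.islower()
--             matched = False
--         else:
--             if ch == '_':
--                 active = False
--             elif active and ch.isupper():
--                 matched = True
--             buf.append(ch)
--     return ''.join(buf) if matched else False
-- ===== Notes on version B (the rewrite author's own statement) =====
-- stated objective: alternative
-- what changed: A splits the line into words and rescans each word's tail with a nested character loop; B makes a single character-level pass over the line with a small state machine (buf/active/matched) that detects word boundaries, the comment marker, the underscore cut-off and the qualifying uppercase in one traversal, never calling split.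
import Mathlib
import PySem

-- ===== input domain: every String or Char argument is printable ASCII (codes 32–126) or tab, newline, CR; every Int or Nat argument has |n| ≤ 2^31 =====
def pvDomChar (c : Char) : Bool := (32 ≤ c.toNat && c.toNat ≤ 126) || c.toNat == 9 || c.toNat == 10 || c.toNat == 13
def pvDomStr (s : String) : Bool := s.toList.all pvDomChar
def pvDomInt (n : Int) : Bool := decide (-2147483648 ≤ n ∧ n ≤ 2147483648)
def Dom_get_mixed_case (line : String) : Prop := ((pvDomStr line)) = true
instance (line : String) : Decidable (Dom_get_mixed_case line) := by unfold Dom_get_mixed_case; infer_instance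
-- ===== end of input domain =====

-- B replaces A's split-into-words + per-word rescan by a single character-level
-- state-machine pass over the line; 'return word' (a non-empty str, truthy) is
-- ported as 'true'. Objective: alternative (same cost, different algorithm).

-- ===== PORT A =====
-- inner loop of A: for character in word[1:]: break on '_', return on upper
def pvAScan : List Char → Bool
  | [] => false
  | c :: rest =>
    if c = '_' then false
    else if PySem.Chars.isupper c then true
    else pvAScan rest

-- outer loop of A over the words
def pvALoop : List String → Bool
  | [] => false
  | w :: ws =>
    if PySem.Str.len w > 1 &&
        (match w.toList with | c :: _ => PySem.Chars.islower c | [] => false) then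
      if pvAScan (PySem.List.slice w.toList (some 1) none) then true
      else pvALoop ws
    else pvALoop ws

def get_mixed_case (line : String) : Bool :=
  let line := ((PySem.Str.split? line "#").getD []).headD ""   -- line.split('#')[0]
  let words := PySem.Str.split₀ line                            -- line.split()
  pvALoop words

-- ===== PORT B =====
-- the single for-loop of Source B: state = (buf, active, matched); '#' breaks,
-- whitespace ends a word (return on matched), otherwise the word state advances
def pvBScan : List Char → List Char → Bool → Bool → Bool
  | [], _, _, matched => matched
  | c :: rest, buf, active, matched =>
    if c = '#' then matched
    else if PySem.Chars.isspace c then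
      (if matched then true else pvBScan rest [] false false)
    else if buf.isEmpty then
      pvBScan rest [c] (PySem.Chars.islower c) false
    else if c = '_' then
      pvBScan rest (buf ++ [c]) false matched
    else if active && PySem.Chars.isupper c then
      pvBScan rest (buf ++ [c]) active true
    else
      pvBScan rest (buf ++ [c]) active matched

def get_mixed_case_alt (line : String) : Bool :=
  pvBScan line.toList [] false false

-- ===== PRECONDITION & SPEC =====
def Spec_get_mixed_case (line : String) (out : Bool) : Prop := out = get_mixed_case_alt line
instance (line : String) (out : Bool) : Decidable (Spec_get_mixed_case line out) := by unfold Spec_get_mixed_case; infer_instance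

-- ===== CLAIM (what is proved, stated in full; the proofs are below) =====
def Claim_equal_get_mixed_case : Prop := ∀ (line : String), Dom_get_mixed_case line → Spec_get_mixed_case line (get_mixed_case line)

-- ===== LEMMAS AND PROOFS =====

-- char-level version of A's per-word test
def pvQual (w : List Char) : Bool :=
  match w with
  | [] => false
  | c :: t => PySem.Chars.islower c && pvAScan t

-- B's 'active' flag as a function of the collected word so far
def pvActB (buf : List Char) : Bool :=
  match buf with
  | [] => false
  | c :: t => PySem.Chars.islower c && !t.contains '_'

-- A's outer loop is 'any pvQual' at the char level
theorem pvALoop_eq_any (ws : List (List Char)) :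
    pvALoop (ws.map String.ofList) = ws.any pvQual := by
  induction ws with
  | nil => rfl
  | cons w ws ih =>
    have htl : (String.ofList w).toList = w := by simp
    have hlen : PySem.Str.len (String.ofList w) = (w.length : Int) := by
      rw [PySem.Str.len_eq, htl]
    simp only [List.map_cons, pvALoop, htl, hlen, List.any_cons, ← ih]
    match w with
    | [] => simp [pvQual]
    | [c] => simp [pvQual, pvAScan]
    | c :: d :: t =>
      have hg : ((1:Int) < ((c :: d :: t).length : Int)) := by
        simp only [List.length_cons]; push_cast; omega
      have hsl : PySem.List.slice (c :: d :: t) (some 1) none = d :: t := by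
        rw [PySem.List.slice_from _ (by norm_num)]; rfl
      simp only [hg, decide_true, Bool.true_and, hsl, pvQual]
      rcases hl : PySem.Chars.islower c with _ | _
      · simp [hl]
      · rcases hsc : pvAScan (d :: t) with _ | _ <;> simp [hsc]

-- splitOn.go with a nonempty accumulator just prepends its reversed contents
theorem pvGoOn_acc (fuel : Nat) (l cur acc : List Char) (accs : List (List Char)) :
    PySem.Chars.splitOn.go ['#'] fuel l cur (acc :: accs) =
      (acc :: accs).reverse ++ PySem.Chars.splitOn.go ['#'] fuel l cur [] := by
  induction fuel generalizing l cur acc accs with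
  | zero => simp [PySem.Chars.splitOn.go]
  | succ fuel ih =>
    match l with
    | [] => simp [PySem.Chars.splitOn.go]
    | c :: rest =>
      simp only [PySem.Chars.splitOn.go]
      split_ifs with h1
      · rw [ih, ih _ _ cur.reverse []]
        simp
      · exact ih _ _ _ _

-- head of splitOn.go by '#': everything before the first '#'
theorem pvGoOn_head (fuel : Nat) (l cur : List Char) (h : l.length < fuel) :
    (PySem.Chars.splitOn.go ['#'] fuel l cur []).head? =
      some (cur.reverse ++ l.takeWhile (· ≠ '#')) := by
  induction fuel generalizing l cur with
  | zero => omega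
  | succ fuel ih =>
    match l with
    | [] => simp [PySem.Chars.splitOn.go]
    | c :: rest =>
      simp only [PySem.Chars.splitOn.go, List.takeWhile]
      by_cases hc : c = '#'
      · rw [if_pos (by simp [hc, List.isPrefixOf])]
        rw [pvGoOn_acc]
        simp [hc]
      · rw [if_neg (by simp [List.isPrefixOf]; exact fun he => (hc he.symm).elim)]
        rw [ih rest (c :: cur) (by simp at h ⊢; omega)]
        simp [hc]

-- A's result through split?/split₀ in char-level terms
theorem pvA_char (line : String) :
    get_mixed_case line =
      (PySem.Chars.split₀ (line.toList.takeWhile (· ≠ '#'))).any pvQual := by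
  have hsep : ("#" : String).toList = ['#'] := rfl
  have hhead : (PySem.Chars.splitOn line.toList ['#']).head? =
      some (line.toList.takeWhile (· ≠ '#')) := by
    unfold PySem.Chars.splitOn
    exact pvGoOn_head _ _ [] (by omega)
  have h1 : ((PySem.Str.split? line "#").getD []).headD "" =
      String.ofList (line.toList.takeWhile (· ≠ '#')) := by
    unfold PySem.Str.split? PySem.Chars.split?
    rw [hsep, if_neg (by simp)]
    simp only [Option.map_some, Option.getD_some]
    rw [List.headD_eq_head?_getD, List.head?_map, hhead]
    rfl
  unfold get_mixed_case
  rw [h1]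
  show pvALoop (PySem.Str.split₀ (String.ofList (line.toList.takeWhile (· ≠ '#')))) = _
  unfold PySem.Str.split₀
  rw [show (String.ofList (line.toList.takeWhile (· ≠ '#'))).toList =
      line.toList.takeWhile (· ≠ '#') from by simp]
  exact pvALoop_eq_any _

-- pvAScan over an append
theorem pvAScan_append (t s : List Char) :
    pvAScan (t ++ s) =
      (pvAScan t || (t.all (fun d => !(d = '_') && !PySem.Chars.isupper d) && pvAScan s)) := by
  induction t with
  | nil => simp [pvAScan]
  | cons c r ih =>
    simp only [List.cons_append, pvAScan, List.all_cons]
    by_cases h1 : c = '_'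
    · simp [h1, pvAScan]
    · rcases h2 : PySem.Chars.isupper c with _ | _
      · simp [h1, h2, ih, Bool.and_assoc]
      · simp [h1, h2]

-- split₀.go with a nonempty accumulator just prepends its reversed contents
theorem pvGo_acc (cs cur acc) :
    PySem.Chars.split₀.go cs cur acc = acc.reverse ++ PySem.Chars.split₀.go cs cur [] := by
  induction cs generalizing cur acc with
  | nil =>
    simp only [PySem.Chars.split₀.go]
    split_ifs <;> simp
  | cons c rest ih =>
    simp only [PySem.Chars.split₀.go]
    split_ifs with h1 h2
    · exact ih _ _
    · rw [ih _ (cur.reverse :: acc), ih _ [cur.reverse]]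
      simp
    · exact ih _ _

-- head of split₀.go with a nonempty current word
theorem pvGo_head (cs cur : List Char) (h : cur ≠ []) :
    (PySem.Chars.split₀.go cs cur []).head? =
      some (cur.reverse ++ cs.takeWhile (fun d => !PySem.Chars.isspace d)) := by
  induction cs generalizing cur with
  | nil =>
    simp only [PySem.Chars.split₀.go, List.isEmpty_iff, if_neg h]
    simp
  | cons c rest ih =>
    simp only [PySem.Chars.split₀.go, List.takeWhile]
    rcases hs : PySem.Chars.isspace c with _ | _
    · rw [if_neg (by simp)]
      rw [ih (c :: cur) (by simp)]
      simp
    · have hne : cur.isEmpty = false := by simpa using h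
      rw [if_pos rfl, hne]
      rw [if_neg (by simp), pvGo_acc]
      simp

-- once matched, B returns true
theorem pvBScan_matched (cs : List Char) (buf : List Char) (active : Bool)
    (hb : buf ≠ []) : pvBScan cs buf active true = true := by
  induction cs generalizing buf active with
  | nil => rfl
  | cons c rest ih =>
    simp only [pvBScan, List.isEmpty_iff, if_neg hb]
    split_ifs <;> first | rfl | exact ih _ _ (by simp)

-- B ignores everything from the first '#'
theorem pvBScan_hash (cs buf active matched) :
    pvBScan cs buf active matched = pvBScan (cs.takeWhile (· ≠ '#')) buf active matched := by
  induction cs generalizing buf active matched with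
  | nil => rfl
  | cons c rest ih =>
    by_cases hc : c = '#'
    · subst hc
      simp [pvBScan, List.takeWhile]
    · rw [List.takeWhile_cons_of_pos (by simpa using hc)]
      simp only [pvBScan, if_neg hc]
      split_ifs <;> first | rfl | exact ih _ _ _

-- a word prefix that A's scan rejects and that has no underscore passes A's 'all' filter
theorem pvAScan_false_all (t : List Char) (hc : t.contains '_' = false)
    (hs : pvAScan t = false) :
    t.all (fun d => !(d = '_') && !PySem.Chars.isupper d) = true := by
  induction t with
  | nil => rfl
  | cons c r ih =>
    simp only [List.contains_cons, Bool.or_eq_false_iff, beq_eq_false_iff_ne] at hc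
    have hcne : c ≠ '_' := fun he => hc.1 he.symm
    simp only [pvAScan, if_neg hcne] at hs
    rcases hu : PySem.Chars.isupper c with _ | _
    · rw [hu] at hs
      simp only [Bool.false_eq_true, if_false] at hs
      simp [hcne, hu, ih hc.2 hs]
    · rw [hu] at hs
      simp at hs

-- main invariant: B's scan equals 'any pvQual' over the words still to be formed
theorem pvBScan_inv (cs : List Char) (h : '#' ∉ cs) (buf : List Char)
    (hq : pvQual buf = false) :
    pvBScan cs buf (pvActB buf) false = (PySem.Chars.split₀.go cs buf.reverse []).any pvQual := by
  induction cs generalizing buf with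
  | nil =>
    match buf, hq with
    | [], _ => rfl
    | b :: bt, hq =>
      simp [pvBScan, PySem.Chars.split₀.go, hq]
  | cons c rest ih =>
    have hch : c ≠ '#' := fun he => h (he ▸ List.mem_cons_self ..)
    have hrest : '#' ∉ rest := fun hm => h (List.mem_cons_of_mem _ hm)
    simp only [pvBScan, PySem.Chars.split₀.go, if_neg hch]
    rcases hs : PySem.Chars.isspace c with _ | _
    · -- a word character
      rw [if_neg Bool.false_ne_true, if_neg Bool.false_ne_true]
      match buf with
      | [] =>
        rw [if_pos List.isEmpty_nil]
        have ha : pvActB [c] = PySem.Chars.islower c := by simp [pvActB]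
        rw [← ha]
        exact ih hrest [c] (by simp [pvQual, pvAScan])
      | b :: bt =>
        rw [if_neg (by simp : ¬((b :: bt).isEmpty = true))]
        by_cases hund : c = '_'
        · subst hund
          rw [if_pos rfl]
          have ha : pvActB ((b :: bt) ++ ['_']) = false := by simp [pvActB]
          have hq2 : pvQual ((b :: bt) ++ ['_']) = false := by
            simp only [pvQual, List.cons_append, pvAScan_append]
            rcases hlow : PySem.Chars.islower b with _ | _
            · simp
            · have hsb : pvAScan bt = false := by simpa [pvQual, hlow] using hq
              simp [hsb, pvAScan]
          have hmain := ih hrest ((b :: bt) ++ ['_']) hq2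
          rw [ha] at hmain
          simp only [List.reverse_append, List.reverse_cons, List.reverse_nil,
            List.nil_append, List.cons_append] at hmain ⊢
          exact hmain
        · rw [if_neg hund]
          by_cases hup : (pvActB (b :: bt) && PySem.Chars.isupper c) = true
          · rw [if_pos hup]
            rw [pvBScan_matched _ _ _ (by simp)]
            obtain ⟨⟨hlow, hnc⟩, hupc⟩ :
                (PySem.Chars.islower b = true ∧ bt.contains '_' = false) ∧
                  PySem.Chars.isupper c = true := by
              simp only [pvActB, Bool.and_eq_true, Bool.not_eq_true'] at hup
              exact ⟨⟨hup.1.1, hup.1.2⟩, hup.2⟩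
            have hsb : pvAScan bt = false := by simpa [pvQual, hlow] using hq
            have hall := pvAScan_false_all bt hnc hsb
            have hh := pvGo_head rest (c :: (b :: bt).reverse) (by simp)
            have hmem : ((c :: (b :: bt).reverse).reverse ++
                rest.takeWhile (fun d => !PySem.Chars.isspace d)) ∈
                PySem.Chars.split₀.go rest (c :: (b :: bt).reverse) [] := by
              apply List.mem_of_mem_head?
              rw [hh]; rfl
            refine Eq.symm (List.any_eq_true.mpr ⟨_, hmem, ?_⟩)
            simp only [List.reverse_cons, List.reverse_reverse, List.reverse_append,
              List.reverse_nil, List.nil_append, List.append_assoc, List.cons_append]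
            simp only [pvQual, hlow, Bool.true_and, pvAScan_append, hsb, hall,
              Bool.false_or]
            simp [pvAScan, hund, hupc]
          · rw [if_neg hup]
            have ha : pvActB ((b :: bt) ++ [c]) = pvActB (b :: bt) := by
              have h2 : ('_' = c) = False := eq_false (fun he => hund he.symm)
              simp [pvActB, h2]
            have hq3 : pvQual ((b :: bt) ++ [c]) = false := by
              simp only [pvQual, List.cons_append, pvAScan_append]
              rcases hlow : PySem.Chars.islower b with _ | _
              · simp
              · have hsb : pvAScan bt = false := by simpa [pvQual, hlow] using hq
                have hscanc : pvAScan [c] = PySem.Chars.isupper c := by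
                  simp [pvAScan, hund]
                rcases hctn : bt.contains '_' with _ | _
                · have hup' : PySem.Chars.isupper c = false := by
                    simp only [pvActB, hlow, Bool.true_and, hctn, Bool.not_false,
                      Bool.and_eq_true] at hup
                    simpa using hup
                  simp [hsb, hscanc, hup']
                · have hallf : bt.all (fun d => !(d = '_') && !PySem.Chars.isupper d)
                      = false := by
                    rw [List.all_eq_false]
                    refine ⟨'_', ?_, by simp⟩
                    simpa using hctn
                  simp [hsb, hallf]
            have hmain := ih hrest ((b :: bt) ++ [c]) hq3
            rw [ha] at hmain
            simp only [List.reverse_append, List.reverse_cons, List.reverse_nil,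
              List.nil_append, List.cons_append] at hmain ⊢
            exact hmain
    · -- whitespace: the current word ends
      rw [if_pos rfl, if_neg Bool.false_ne_true, if_pos rfl]
      match buf with
      | [] =>
        rw [if_pos (by simp : ([] : List Char).reverse.isEmpty = true)]
        exact ih hrest [] rfl
      | b :: bt =>
        rw [if_neg (by simp : ¬((b :: bt).reverse.isEmpty = true))]
        rw [pvGo_acc]
        have hmain := ih hrest [] rfl
        simp only [List.reverse_nil] at hmain
        simp [hq]
        exact hmain

-- ===== VERDICT (by name: the statement is the Claim_ definition above) =====
theorem get_mixed_case_spec : Claim_equal_get_mixed_case := by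
  intro line _
  unfold Spec_get_mixed_case
  rw [pvA_char]
  unfold get_mixed_case_alt
  rw [pvBScan_hash]
  have h : '#' ∉ line.toList.takeWhile (· ≠ '#') := by
    intro hm
    have := List.mem_takeWhile_imp hm
    simp at this
  exact (pvBScan_inv _ h [] rfl).symm
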